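-- pv_equiv track=rewrite | github.com/ase12345636/NTNU-1141-Predictive-Learning-from-Data | utils/gradcam_advanced.py | get_images_by_disease
-- ===== SOURCE A (Python) =====
-- def get_images_by_disease(bbox_data, class_names):
--     """Return mapping disease -> list of image names."""
--     disease_images = {disease: [] for disease in class_names}
--     for img_name, bbox_list in bbox_data.items():
--         for bbox_info in bbox_list:
--             disease = bbox_info['label']
--             if disease in disease_images:
--                 disease_images[disease].append(img_name)
--     return disease_images
-- ===== SOURCE B (Python) =====
-- def get_images_by_disease(bbox_data, class_names):
--     """Return mapping disease -> list of image names."""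
--     return {
--         disease: [
--             img_name
--             for img_name, bbox_list in bbox_data.items()
--             for bbox_info in bbox_list
--             if bbox_info['label'] == disease
--         ]
--         for disease in class_names
--     }
-- ===== Notes on version B (the rewrite author's own statement) =====
-- stated objective: idiomatic
-- what changed: Replaced the single mutating pass that appends into a pre-built dict with a dict comprehension that, for each disease in class_names, rescans bbox_data and collects the matching image names directly.
import Mathlib
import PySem

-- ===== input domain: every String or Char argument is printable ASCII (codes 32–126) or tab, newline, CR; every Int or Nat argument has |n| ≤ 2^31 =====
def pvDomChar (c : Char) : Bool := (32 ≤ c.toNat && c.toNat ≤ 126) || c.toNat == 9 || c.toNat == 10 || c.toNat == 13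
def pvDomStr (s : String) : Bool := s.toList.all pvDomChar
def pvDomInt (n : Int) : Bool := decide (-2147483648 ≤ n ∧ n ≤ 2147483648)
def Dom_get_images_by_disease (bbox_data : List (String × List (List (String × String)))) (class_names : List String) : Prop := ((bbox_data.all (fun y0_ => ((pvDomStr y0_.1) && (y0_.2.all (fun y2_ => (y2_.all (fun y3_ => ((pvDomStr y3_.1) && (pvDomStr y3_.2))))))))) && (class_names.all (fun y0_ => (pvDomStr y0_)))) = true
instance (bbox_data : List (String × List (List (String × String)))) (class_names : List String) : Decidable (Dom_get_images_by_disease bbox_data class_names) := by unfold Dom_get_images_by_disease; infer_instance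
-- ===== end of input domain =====

-- B replaces A's single mutating pass (append into a pre-built dict) with an idiomatic
-- dict comprehension that rescans bbox_data once per disease; not faster, just plainer.

-- ===== PORT A =====
-- one step of A's inner loop: bbox_info['label'] (KeyError = none, excluded by Pre_),
-- then 'if disease in disease_images: disease_images[disease].append(img_name)'
def pvStepA (img : String) (d : PySem.Dict String (List String)) (bb : List (String × String)) : PySem.Dict String (List String) :=
  match (PySem.Dict.ofList bb).get? "label" with
  | some disease => if d.contains disease then d.modify disease [] (· ++ [img]) else d
  | none => d

def get_images_by_disease (bbox_data : List (String × List (List (String × String)))) (class_names : List String) : List (String × List String) :=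
  let disease_images : PySem.Dict String (List String) :=
    class_names.foldl (fun d disease => d.insert disease []) PySem.Dict.empty
  (bbox_data.foldl (fun d p => p.2.foldl (pvStepA p.1) d) disease_images).items

-- ===== PORT B =====
-- the inner comprehension of Source B for one disease: bbox_info['label'] == disease
-- (under Pre_ the key is always present, so get? = some and == is Python's ==)
def pvMatches (bbox_data : List (String × List (List (String × String)))) (disease : String) : List String :=
  bbox_data.flatMap (fun p =>
    (p.2.filter (fun bb => (PySem.Dict.ofList bb).get? "label" == some disease)).map (fun _ => p.1))

def get_images_by_disease_alt (bbox_data : List (String × List (List (String × String)))) (class_names : List String) : List (String × List String) :=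
  (class_names.foldl (fun d disease => d.insert disease (pvMatches bbox_data disease)) PySem.Dict.empty).items

-- ===== PRECONDITION & SPEC =====
-- Pre_ excludes exactly the inputs on which both Pythons raise KeyError:
-- some bbox_info dict has no 'label' key.
def Pre_get_images_by_disease (bbox_data : List (String × List (List (String × String)))) (class_names : List String) : Prop :=
  (bbox_data.all (fun p => p.2.all (fun bb => bb.any (fun kv => kv.1 == "label")))) = true
instance (bbox_data : List (String × List (List (String × String)))) (class_names : List String) : Decidable (Pre_get_images_by_disease bbox_data class_names) := by unfold Pre_get_images_by_disease; infer_instance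
def pvWitness_get_images_by_disease : (List (String × List (List (String × String)))) × List String :=
  ([("img1", [[("label", "flu")], [("label", "cold")]])], ["flu", "cold"])
def Spec_get_images_by_disease (bbox_data : List (String × List (List (String × String)))) (class_names : List String) (out : List (String × List String)) : Prop := out = get_images_by_disease_alt bbox_data class_names
instance (bbox_data : List (String × List (List (String × String)))) (class_names : List String) (out : List (String × List String)) : Decidable (Spec_get_images_by_disease bbox_data class_names out) := by unfold Spec_get_images_by_disease; infer_instance

-- ===== CLAIM (what is proved, stated in full; the proofs are below) =====
def Claim_equal_get_images_by_disease : Prop := ∀ (bbox_data : List (String × List (List (String × String)))) (class_names : List String), Dom_get_images_by_disease bbox_data class_names → Pre_get_images_by_disease bbox_data class_names → Spec_get_images_by_disease bbox_data class_names (get_images_by_disease bbox_data class_names)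

-- ===== LEMMAS AND PROOFS =====

-- B side: getD of a fold of inserts whose values do not depend on the dict
theorem pv_getD_foldl_insert_indep (l : List String) (F : String → List String)
    (d : PySem.Dict String (List String)) (k : String) :
    (l.foldl (fun d c => d.insert c (F c)) d).getD k [] =
      if k ∈ l then F k else d.getD k [] := by
  induction l generalizing d with
  | nil => simp
  | cons c l ih =>
    simp only [List.foldl_cons, ih, PySem.Dict.getD_insert, List.mem_cons]
    by_cases h1 : k ∈ l <;> by_cases h2 : k = c <;> simp [h1, h2]

-- A side: one inner step preserves keys
theorem pv_keys_stepA (img : String) (d : PySem.Dict String (List String))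
    (bb : List (String × String)) : (pvStepA img d bb).keys = d.keys := by
  unfold pvStepA
  cases h : (PySem.Dict.ofList bb).get? "label" with
  | none => rfl
  | some dis =>
    simp only
    by_cases hc : d.contains dis = true
    · simp only [hc, if_true, PySem.Dict.keys_modify]
      exact PySem.Dict.keys_insert_of_contains _ _ hc
    · simp [hc]

theorem pv_keys_innerA (img : String) (bl : List (List (String × String)))
    (d : PySem.Dict String (List String)) :
    (bl.foldl (pvStepA img) d).keys = d.keys := by
  induction bl generalizing d with
  | nil => rfl
  | cons bb bl ih => simp only [List.foldl_cons, ih, pv_keys_stepA]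

theorem pv_keys_outerA (bd : List (String × List (List (String × String))))
    (d : PySem.Dict String (List String)) :
    (bd.foldl (fun d p => p.2.foldl (pvStepA p.1) d) d).keys = d.keys := by
  induction bd generalizing d with
  | nil => rfl
  | cons p bd ih => simp only [List.foldl_cons, ih, pv_keys_innerA]

-- A side: value at a present key k after one step
theorem pv_getD_stepA (img : String) (d : PySem.Dict String (List String))
    (bb : List (String × String)) (k : String) (hk : d.contains k = true) :
    (pvStepA img d bb).getD k [] =
      d.getD k [] ++ (if (PySem.Dict.ofList bb).get? "label" == some k then [img] else []) := by
  unfold pvStepA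
  cases h : (PySem.Dict.ofList bb).get? "label" with
  | none => simp
  | some dis =>
    by_cases hd : dis = k
    · subst hd
      simp [hk]
    · have : ¬ (k = dis) := fun h => hd h.symm
      by_cases hc : d.contains dis = true
      · simp [hc, PySem.Dict.getD_modify, this, hd]
      · simp [hc, hd]

theorem pv_contains_innerA (img : String) (bl : List (List (String × String)))
    (d : PySem.Dict String (List String)) (k : String) :
    (bl.foldl (pvStepA img) d).contains k = d.contains k := by
  rw [PySem.Dict.contains_eq_decide_mem_keys, PySem.Dict.contains_eq_decide_mem_keys,
    pv_keys_innerA]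

theorem pv_getD_innerA (img : String) (bl : List (List (String × String)))
    (d : PySem.Dict String (List String)) (k : String) (hk : d.contains k = true) :
    (bl.foldl (pvStepA img) d).getD k [] =
      d.getD k [] ++ (bl.filter (fun bb => (PySem.Dict.ofList bb).get? "label" == some k)).map (fun _ => img) := by
  induction bl generalizing d with
  | nil => simp
  | cons bb bl ih =>
    have hk' : (pvStepA img d bb).contains k = true := by
      rw [PySem.Dict.contains_eq_decide_mem_keys, pv_keys_stepA,
        ← PySem.Dict.contains_eq_decide_mem_keys]; exact hk
    simp only [List.foldl_cons, ih _ hk', pv_getD_stepA img d bb k hk, List.filter_cons]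
    by_cases h : ((PySem.Dict.ofList bb).get? "label" == some k) = true <;> simp [h]

theorem pv_getD_outerA (bd : List (String × List (List (String × String))))
    (d : PySem.Dict String (List String)) (k : String) (hk : d.contains k = true) :
    (bd.foldl (fun d p => p.2.foldl (pvStepA p.1) d) d).getD k [] =
      d.getD k [] ++ pvMatches bd k := by
  induction bd generalizing d with
  | nil => simp [pvMatches]
  | cons p bd ih =>
    have hk' : (p.2.foldl (pvStepA p.1) d).contains k = true := by
      rw [pv_contains_innerA]; exact hk
    simp only [List.foldl_cons, ih _ hk', pv_getD_innerA _ _ _ _ hk]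
    simp [pvMatches, List.flatMap_cons, List.append_assoc]

-- ===== VERDICT (by name: the statement is the Claim_ definition above) =====
theorem get_images_by_disease_spec : Claim_equal_get_images_by_disease := by
  intro bd cn _ _
  unfold Spec_get_images_by_disease get_images_by_disease get_images_by_disease_alt
  simp only
  set d0 : PySem.Dict String (List String) :=
    cn.foldl (fun d disease => d.insert disease []) PySem.Dict.empty with hd0
  set dB : PySem.Dict String (List String) :=
    cn.foldl (fun d disease => d.insert disease (pvMatches bd disease)) PySem.Dict.empty with hdB
  have hkeys0 : d0.keys = PySem.Set.ofList cn := by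
    rw [hd0, PySem.Dict.keys_foldl_insert, PySem.Dict.keys_empty, PySem.Set.update_nil_left]
  have hkeysB : dB.keys = PySem.Set.ofList cn := by
    rw [hdB, PySem.Dict.keys_foldl_insert, PySem.Dict.keys_empty, PySem.Set.update_nil_left]
  have hkeysA : (bd.foldl (fun d p => p.2.foldl (pvStepA p.1) d) d0).keys = PySem.Set.ofList cn := by
    rw [pv_keys_outerA, hkeys0]
  have hnd : (PySem.Set.ofList cn).Nodup := PySem.Set.nodup_ofList cn
  rw [PySem.Dict.items_eq_map_keys _ (by rw [hkeysA]; exact hnd) [],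
      PySem.Dict.items_eq_map_keys _ (by rw [hkeysB]; exact hnd) [],
      hkeysA, hkeysB]
  apply List.map_congr_left
  intro k hkmem
  have hkcn : k ∈ cn := (PySem.Set.mem_ofList cn k).mp hkmem
  have hc0 : d0.contains k = true := by
    rw [PySem.Dict.contains_eq_decide_mem_keys, hkeys0]; simpa using hkmem
  have hA : (bd.foldl (fun d p => p.2.foldl (pvStepA p.1) d) d0).getD k [] = pvMatches bd k := by
    rw [pv_getD_outerA _ _ _ hc0, hd0, pv_getD_foldl_insert_indep cn (fun _ => []) _ k]
    simp [hkcn]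
  have hB : dB.getD k [] = pvMatches bd k := by
    rw [hdB, pv_getD_foldl_insert_indep cn (pvMatches bd) _ k]; simp [hkcn]
  rw [hA, hB]
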